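-- pv_equiv track=rewrite | github.com/MarkusBolinder/AoC | 2024/day_25.py | f
-- ===== SOURCE A (Python) =====
-- def f(key, lock):
--     X = len(key)
--     Y = len(key[0])
--     for x in range(X):
--         for y in range(Y):
--             if key[x][y] == "#" and lock[x][y] == "#":
--                 return False
--     return True
-- ===== SOURCE B (Python) =====
-- def f(key, lock):
--     Y = len(key[0])
--
--     def mask(grid):
--         m = 0
--         for x, row in enumerate(grid):
--             for y, ch in enumerate(row[:Y]):
--                 if ch == "#":
--                     m |= 1 << (x * Y + y)
--         return m
--
--     return (mask(key) & mask(lock)) == 0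
-- ===== Notes on version B (the rewrite author's own statement) =====
-- stated objective: alternative
-- what changed: Replaces A's nested cell-by-cell comparison with early return by encoding each grid as one integer bitmask (bit x*Y+y set for each '#' in row[:Y]) built in two independent enumerate passes, and testing overlap with a single bitwise AND against zero.
import Mathlib
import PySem

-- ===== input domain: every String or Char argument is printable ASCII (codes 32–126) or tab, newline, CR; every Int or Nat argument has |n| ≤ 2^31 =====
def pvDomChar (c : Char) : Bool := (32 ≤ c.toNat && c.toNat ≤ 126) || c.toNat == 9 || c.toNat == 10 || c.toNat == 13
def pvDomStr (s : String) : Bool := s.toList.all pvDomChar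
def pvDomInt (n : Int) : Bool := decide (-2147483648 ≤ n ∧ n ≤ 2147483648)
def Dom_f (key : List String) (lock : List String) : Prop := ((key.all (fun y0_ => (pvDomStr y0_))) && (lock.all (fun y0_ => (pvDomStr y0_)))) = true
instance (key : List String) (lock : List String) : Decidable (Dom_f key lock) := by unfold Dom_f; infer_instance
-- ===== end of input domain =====

-- B replaces A's nested cell-by-cell comparison with early return by encoding each grid as
-- one integer bitmask (bit x*Y+y set for each '#' in row[:Y]), built in two independent
-- passes, and testing overlap with a single bitwise AND against zero (objective: alternative).

-- ===== PORT A =====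
def fInner (krow lrow : String) : List Int → Bool
  | [] => true
  | y :: ys =>
    if (PySem.Str.pyGet? krow y == some '#') && (PySem.Str.pyGet? lrow y == some '#') then
      false
    else
      fInner krow lrow ys

def fOuter (key lock : List String) (Y : Int) : List Int → Bool
  | [] => true
  | x :: xs =>
    if fInner (PySem.List.pyGetD key x "") (PySem.List.pyGetD lock x "") (PySem.List.pyRange 0 Y 1) then
      fOuter key lock Y xs
    else
      false

def f (key : List String) (lock : List String) : Bool :=
  let X : Int := key.length
  let Y : Int := PySem.Str.len (PySem.List.pyGetD key 0 "")
  fOuter key lock Y (PySem.List.pyRange 0 X 1)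

-- ===== PORT B =====
-- inner loop of B's mask builder: 'for y, ch in enumerate(row[:Y]): if ch == "#": m |= 1 << (x*Y+y)'
def bMaskInner (Y x : Int) (m : Nat) : List (Int × Char) → Nat
  | [] => m
  | p :: rest =>
    bMaskInner Y x (if p.2 == '#' then m ||| (1 <<< (x * Y + p.1).toNat) else m) rest

-- outer loop of B's mask builder: 'for x, row in enumerate(grid): …'
def bMaskOuter (Y : Int) (m : Nat) : List (Int × String) → Nat
  | [] => m
  | p :: rest =>
    bMaskOuter Y
      (bMaskInner Y p.1 m
        (PySem.List.enumerate (PySem.Str.slice p.2 none (some Y)).toList 0)) rest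

def gridMask (grid : List String) (Y : Int) : Nat :=
  bMaskOuter Y 0 (PySem.List.enumerate grid 0)

def f_alt (key : List String) (lock : List String) : Bool :=
  let Y : Int := PySem.Str.len (PySem.List.pyGetD key 0 "")
  (gridMask key Y &&& gridMask lock Y) == 0

-- ===== PRECONDITION & SPEC =====
-- the cell test both programs perform at a coordinate (missing cells read as non-'#')
def cellHash (grid : List String) (x y : Int) : Bool :=
  PySem.Str.pyGet? (PySem.List.pyGetD grid x "") y == some '#'

-- a rectangle coordinate whose access raises IndexError in A: key row x shorter than y+1,
-- or a '#' cell of key that lock does not cover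
def badCell (key lock : List String) (x y : Int) : Prop :=
  PySem.Str.len (PySem.List.pyGetD key x "") ≤ y ∨
  (cellHash key x y = true ∧
    ((lock.length : Int) ≤ x ∨ PySem.Str.len (PySem.List.pyGetD lock x "") ≤ y))

-- Pre_ is exactly the inputs on which Python A returns: key nonempty, and every bad cell
-- (short key row, or a '#' cell of key that lock does not cover) is preceded in row-major
-- order by an overlapping '#', so A's early return fires before the IndexError would.
def Pre_f (key : List String) (lock : List String) : Prop :=
  key ≠ [] ∧
  ∀ x ∈ PySem.List.pyRange 0 (key.length : Int) 1,
    ∀ y ∈ PySem.List.pyRange 0 (PySem.Str.len (key.headD "")) 1,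
      badCell key lock x y →
        ∃ x' ∈ PySem.List.pyRange 0 (key.length : Int) 1,
          ∃ y' ∈ PySem.List.pyRange 0 (PySem.Str.len (key.headD "")) 1,
            (x' < x ∨ (x' = x ∧ y' < y)) ∧
            cellHash key x' y' = true ∧ cellHash lock x' y' = true
instance (key : List String) (lock : List String) : Decidable (Pre_f key lock) := by
  unfold Pre_f badCell; infer_instance

def pvWitness_f : List String × List String := (["#.", ".#"], [".#", "#."])

def Spec_f (key : List String) (lock : List String) (out : Bool) : Prop := out = f_alt key lock
instance (key : List String) (lock : List String) (out : Bool) : Decidable (Spec_f key lock out) := by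
  unfold Spec_f; infer_instance

-- ===== CLAIM (what is proved, stated in full; the proofs are below) =====
def Claim_equal_f : Prop := ∀ (key : List String) (lock : List String), Dom_f key lock → Pre_f key lock → Spec_f key lock (f key lock)

-- ===== LEMMAS AND PROOFS =====

-- ---- A-side characterisation ----
lemma fInner_eq_any (krow lrow : String) (ys : List Int) :
    fInner krow lrow ys =
      !(ys.any fun y => (PySem.Str.pyGet? krow y == some '#') && (PySem.Str.pyGet? lrow y == some '#')) := by
  induction ys with
  | nil => rfl
  | cons y ys ih =>
    simp only [fInner, List.any_cons]
    split_ifs with h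
    · simp only [h, Bool.true_or, Bool.not_true]
    · rw [Bool.not_eq_true] at h
      simp only [h, Bool.false_or, ih]

lemma fOuter_eq_forall (key lock : List String) (Y : Int) (xs : List Int) :
    fOuter key lock Y xs = true ↔
      ∀ x ∈ xs, ¬ ∃ y ∈ PySem.List.pyRange 0 Y 1,
        cellHash key x y = true ∧ cellHash lock x y = true := by
  induction xs with
  | nil => simp [fOuter]
  | cons x xs ih =>
    simp only [fOuter, fInner_eq_any, cellHash]
    split_ifs with h
    · rw [Bool.not_eq_eq_eq_not, Bool.not_true, List.any_eq_false] at h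
      rw [ih]
      constructor
      · intro hall z hz
        rcases List.mem_cons.mp hz with hz | hz
        · subst hz
          rintro ⟨y, hy, hk, hl⟩
          exact h y hy (by rw [hk, hl]; rfl)
        · exact hall z hz
      · intro hall z hz
        exact hall z (List.mem_cons_of_mem _ hz)
    · rw [Bool.not_eq_true, Bool.not_eq_false', List.any_eq_true] at h
      constructor
      · intro hc
        exact absurd hc (by simp)
      · intro hall
        exfalso
        rcases h with ⟨y, hy, hc⟩
        rw [Bool.and_eq_true] at hc
        exact hall x (List.mem_cons_self) ⟨y, hy, hc.1, hc.2⟩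

-- ---- B-side characterisation: which bits each mask carries ----
lemma testBit_one_shift (k i : Nat) : (1 <<< k).testBit i = (decide (i = k)) := by
  rw [Nat.shiftLeft_eq, one_mul, Nat.testBit_two_pow]
  simp [eq_comm]

lemma testBit_bMaskInner (Y x : Int) (m : Nat) (ps : List (Int × Char)) (i : Nat) :
    (bMaskInner Y x m ps).testBit i =
      (m.testBit i || ps.any (fun p => (p.2 == '#') && decide (i = (x * Y + p.1).toNat))) := by
  induction ps generalizing m with
  | nil => simp [bMaskInner]
  | cons p ps ih =>
    rw [bMaskInner, ih, List.any_cons]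
    by_cases h : (p.2 == '#') = true
    · rw [if_pos h, h, Nat.testBit_or, testBit_one_shift]
      cases m.testBit i <;> cases decide (i = (x * Y + p.1).toNat) <;> simp
    · have h' : (p.2 == '#') = false := by rwa [Bool.not_eq_true] at h
      rw [if_neg h, h']
      simp

lemma testBit_bMaskOuter (Y : Int) (m : Nat) (ps : List (Int × String)) (i : Nat) :
    (bMaskOuter Y m ps).testBit i =
      (m.testBit i || ps.any (fun p =>
        (PySem.List.enumerate (PySem.Str.slice p.2 none (some Y)).toList 0).any
          (fun q => (q.2 == '#') && decide (i = (p.1 * Y + q.1).toNat)))) := by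
  induction ps generalizing m with
  | nil => simp [bMaskOuter]
  | cons p ps ih =>
    simp only [bMaskOuter, List.any_cons, ih, testBit_bMaskInner]
    cases m.testBit i <;> simp

-- a true cell test pins x inside the grid
lemma cellHash_lt (grid : List String) (x y : Int) (hx : 0 ≤ x)
    (h : cellHash grid x y = true) : x < (grid.length : Int) := by
  by_contra hge
  push Not at hge
  have hg : PySem.List.pyGetD grid x "" = "" := by
    have hx' : x = ((x.toNat : Nat) : Int) := by omega
    rw [hx', PySem.List.pyGetD_natCast]
    exact List.getD_eq_default _ _ (by omega)
  rw [cellHash, hg] at h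
  simp [PySem.List.pyGet?] at h

-- pyGetD on the slice row[:Y] agrees with Python's row[y] inside [0,Y)
lemma cellhash_slice_iff (row : String) (Y j : Int) (hY : 0 ≤ Y) (hj : 0 ≤ j) :
    (j < ((PySem.Str.slice row none (some Y)).toList.length : Int) ∧
      PySem.List.pyGetD (PySem.Str.slice row none (some Y)).toList j ' ' = '#') ↔
    (j < Y ∧ PySem.Str.pyGet? row j = some '#') := by
  have hslc : (PySem.Str.slice row none (some Y)).toList = row.toList.take Y.toNat := by
    rw [PySem.Str.toList_slice]; exact PySem.List.slice_to _ hY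
  have hj' : j = ((j.toNat : Nat) : Int) := by omega
  rw [hslc, List.length_take, hj', PySem.List.pyGetD_natCast, List.getD_eq_getElem?_getD,
    List.getElem?_take, PySem.Str.pyGet?_natCast]
  constructor
  · rintro ⟨hlt, hv⟩
    have h1 : j.toNat < Y.toNat ∧ j.toNat < row.toList.length := by
      constructor <;> omega
    rw [if_pos h1.1] at hv
    rw [List.getElem?_eq_getElem h1.2] at hv ⊢
    exact ⟨by omega, by simpa using hv⟩
  · rintro ⟨hlt, hv⟩
    have h2 : j.toNat < row.toList.length := by
      by_contra hge
      rw [List.getElem?_eq_none (by omega)] at hv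
      simp at hv
    have h1 : j.toNat < Y.toNat := by omega
    rw [if_pos h1]
    rw [List.getElem?_eq_getElem h2] at hv ⊢
    exact ⟨by omega, by simpa using hv⟩

-- the inner any over enumerate(row[:Y]) is exactly 'some y in [0,Y) with row[y] == "#"'
lemma any_enumerate_slice (row : String) (Y x : Int) (i : Nat) (hY : 0 ≤ Y) :
    ((PySem.List.enumerate (PySem.Str.slice row none (some Y)).toList 0).any
        (fun q => (q.2 == '#') && decide (i = (x * Y + q.1).toNat))) = true ↔
      ∃ y ∈ PySem.List.pyRange 0 Y 1,
        (PySem.Str.pyGet? row y == some '#') = true ∧ i = (x * Y + y).toNat := by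
  rw [PySem.List.enumerate_eq_map_pyRange (d := ' '), List.any_map, List.any_eq_true]
  simp only [Function.comp, Bool.and_eq_true, beq_iff_eq, decide_eq_true_iff, PySem.List.len_eq]
  constructor
  · rintro ⟨j, hj, hv, hcode⟩
    rw [PySem.List.mem_pyRange_one] at hj
    have h := (cellhash_slice_iff row Y j hY hj.1).mp ⟨hj.2, hv⟩
    exact ⟨j, PySem.List.mem_pyRange_one.mpr ⟨hj.1, h.1⟩, h.2, hcode⟩
  · rintro ⟨y, hy, hv, hcode⟩
    rw [PySem.List.mem_pyRange_one] at hy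
    have h := (cellhash_slice_iff row Y y hY hy.1).mpr ⟨hy.2, hv⟩
    exact ⟨y, PySem.List.mem_pyRange_one.mpr ⟨hy.1, h.1⟩, h.2, hcode⟩

lemma testBit_gridMask (grid : List String) (Y : Int) (i : Nat) (hY : 0 ≤ Y) :
    (gridMask grid Y).testBit i = true ↔
      ∃ x ∈ PySem.List.pyRange 0 (grid.length : Int) 1,
        ∃ y ∈ PySem.List.pyRange 0 Y 1,
          cellHash grid x y = true ∧ i = (x * Y + y).toNat := by
  unfold gridMask
  rw [testBit_bMaskOuter, Nat.zero_testBit, Bool.false_or,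
    PySem.List.enumerate_eq_map_pyRange (d := ""), List.any_map, List.any_eq_true]
  simp only [Function.comp, PySem.List.len_eq]
  constructor
  · rintro ⟨x, hx, hv⟩
    rcases (any_enumerate_slice _ Y x i hY).mp hv with ⟨y, hy, hc, hcode⟩
    exact ⟨x, hx, y, hy, hc, hcode⟩
  · rintro ⟨x, hx, y, hy, hc, hcode⟩
    exact ⟨x, hx, (any_enumerate_slice _ Y x i hY).mpr ⟨y, hy, hc, hcode⟩⟩

-- the coordinate code x*Y+y is injective for 0 ≤ x and 0 ≤ y < Y
lemma code_inj {x y x' y' Y : Int}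
    (hy0 : 0 ≤ y) (hy : y < Y) (hy0' : 0 ≤ y') (hy' : y' < Y)
    (hx0 : 0 ≤ x) (hx0' : 0 ≤ x')
    (h : (x * Y + y).toNat = (x' * Y + y').toNat) : x = x' ∧ y = y' := by
  have hY0 : 0 ≤ Y := le_of_lt (lt_of_le_of_lt hy0 hy)
  have hxY : 0 ≤ x * Y := mul_nonneg hx0 hY0
  have hxY' : 0 ≤ x' * Y := mul_nonneg hx0' hY0
  have heq : x * Y + y = x' * Y + y' := by omega
  rcases lt_trichotomy x x' with hlt | hEq | hgt
  · exfalso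
    have : (x + 1) * Y ≤ x' * Y := mul_le_mul_of_nonneg_right (by omega) hY0
    nlinarith
  · refine ⟨hEq, ?_⟩
    subst hEq; omega
  · exfalso
    have : (x' + 1) * Y ≤ x * Y := mul_le_mul_of_nonneg_right (by omega) hY0
    nlinarith

-- ===== VERDICT (by name: the statement is the Claim_ definition above) =====
theorem f_spec : Claim_equal_f := by
  intro key lock _ _
  unfold Spec_f
  set Y : Int := PySem.Str.len (PySem.List.pyGetD key 0 "") with hYdef
  have hY : 0 ≤ Y := by rw [hYdef, PySem.Str.len_eq]; positivity
  have hf : f key lock = fOuter key lock Y (PySem.List.pyRange 0 (key.length : Int) 1) := rfl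
  have halt : f_alt key lock = ((gridMask key Y &&& gridMask lock Y) == 0) := rfl
  rw [hf, halt, Bool.eq_iff_iff, fOuter_eq_forall, beq_iff_eq]
  constructor
  · -- no overlapping '#' ⇒ the two masks share no bit
    intro hall
    refine Nat.eq_of_testBit_eq (fun i => ?_)
    rw [Nat.zero_testBit, Nat.testBit_and]
    by_contra hne
    rw [Bool.not_eq_false, Bool.and_eq_true] at hne
    rcases (testBit_gridMask key Y i hY).mp hne.1 with ⟨x, hx, y, hy, hk, hcode⟩
    rcases (testBit_gridMask lock Y i hY).mp hne.2 with ⟨x', hx', y', hy', hl, hcode'⟩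
    rw [PySem.List.mem_pyRange_one] at hx hx'
    have hy2 := PySem.List.mem_pyRange_one.mp hy
    have hy2' := PySem.List.mem_pyRange_one.mp hy'
    obtain ⟨rfl, rfl⟩ := code_inj hy2.1 hy2.2 hy2'.1 hy2'.2 hx.1 hx'.1 (hcode ▸ hcode')
    exact hall x (by rw [PySem.List.mem_pyRange_one]; exact hx) ⟨y, hy, hk, hl⟩
  · -- the masks share no bit ⇒ no overlapping '#'
    intro hzero x hx
    rintro ⟨y, hy, hk, hl⟩
    have hx0 : 0 ≤ x := (PySem.List.mem_pyRange_one.mp hx).1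
    have hxl : x ∈ PySem.List.pyRange 0 (lock.length : Int) 1 := by
      rw [PySem.List.mem_pyRange_one]
      exact ⟨hx0, cellHash_lt lock x y hx0 hl⟩
    have hbit : (gridMask key Y &&& gridMask lock Y).testBit ((x * Y + y).toNat) = true := by
      rw [Nat.testBit_and, Bool.and_eq_true]
      exact ⟨(testBit_gridMask key Y _ hY).mpr ⟨x, hx, y, hy, hk, rfl⟩,
             (testBit_gridMask lock Y _ hY).mpr ⟨x, hxl, y, hy, hl, rfl⟩⟩
    rw [hzero, Nat.zero_testBit] at hbit
    exact absurd hbit (by simp)
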